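-- pv_equiv track=rewrite | github.com/patelarjun14/Portfolio | CS5001/creating_new.py | select_cordinates
-- ===== SOURCE A (Python) =====
-- def select_cordinates(x,y):
--     cord = [-200, -150, -100, -50, 0, 50, 100, 150, 200]
--     x_1= -1
--     y_1= -1
--
--
--     for xcord in range(8):
--         if cord[xcord] <= x:
--             x_1 +=1
--
--     for ycord in range(8):
--         if cord[ycord] <= y:
--             y_1 +=1
--
--     return x_1, y_1
-- ===== SOURCE B (Python) =====
-- def _count_le(a, v):
--     # number of elements of sorted list a that are <= v, by binary search
--     lo, hi = 0, len(a)
--     while lo < hi: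
--         mid = (lo + hi) // 2
--         if a[mid] <= v:
--             lo = mid + 1
--         else:
--             hi = mid
--     return lo
--
--
-- def select_cordinates(x, y):
--     cord = [-200, -150, -100, -50, 0, 50, 100, 150]
--     return _count_le(cord, x) - 1, _count_le(cord, y) - 1
-- ===== Notes on version B (the rewrite author's own statement) =====
-- stated objective: alternative
-- what changed: Replaces the two 8-iteration linear counting loops over the threshold table with a hand-written binary search (upper bound) over the sorted 8-element table, returning count-1 for each coordinate.
import Mathlib
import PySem

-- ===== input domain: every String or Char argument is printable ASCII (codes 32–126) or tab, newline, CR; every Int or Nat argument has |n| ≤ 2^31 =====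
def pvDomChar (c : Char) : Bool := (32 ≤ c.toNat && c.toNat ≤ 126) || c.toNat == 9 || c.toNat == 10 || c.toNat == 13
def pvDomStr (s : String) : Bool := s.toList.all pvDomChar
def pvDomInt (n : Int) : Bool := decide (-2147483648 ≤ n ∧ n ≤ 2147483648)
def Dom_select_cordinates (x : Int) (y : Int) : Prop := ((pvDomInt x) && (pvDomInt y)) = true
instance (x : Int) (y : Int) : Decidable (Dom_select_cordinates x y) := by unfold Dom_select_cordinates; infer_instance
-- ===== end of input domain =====

-- B replaces the two fixed linear counting loops with a binary search (upper bound) over the sorted 8-element threshold table (objective: alternative).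


-- ===== PORT A =====
def select_cordinates (x : Int) (y : Int) : Int × Int :=
  let cord : List Int := [-200, -150, -100, -50, 0, 50, 100, 150, 200]
  let x_1 : Int := -1
  let y_1 : Int := -1
  let x_1 := (PySem.List.pyRange 0 8 1).foldl
    (fun acc xcord => if PySem.List.pyGetD cord xcord 0 ≤ x then acc + 1 else acc) x_1
  let y_1 := (PySem.List.pyRange 0 8 1).foldl
    (fun acc ycord => if PySem.List.pyGetD cord ycord 0 ≤ y then acc + 1 else acc) y_1
  (x_1, y_1)

-- ===== PORT B =====
-- while loop of Source B's _count_le; fuel = a.length is enough since [lo,hi) at least halves each step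
def countLeAux (a : List Int) (v : Int) : Nat → Nat → Nat → Nat
  | 0, lo, _ => lo
  | fuel + 1, lo, hi =>
    if lo < hi then
      let mid := (lo + hi) / 2
      if PySem.List.pyGetD a (mid : Int) 0 ≤ v then countLeAux a v fuel (mid + 1) hi
      else countLeAux a v fuel lo mid
    else lo

def count_le (a : List Int) (v : Int) : Nat := countLeAux a v a.length 0 a.length

def select_cordinates_alt (x : Int) (y : Int) : Int × Int :=
  let cord : List Int := [-200, -150, -100, -50, 0, 50, 100, 150]
  ((count_le cord x : Int) - 1, (count_le cord y : Int) - 1)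

-- ===== PRECONDITION & SPEC =====
def Spec_select_cordinates (x : Int) (y : Int) (out : Int × Int) : Prop := out = select_cordinates_alt x y
instance (x : Int) (y : Int) (out : Int × Int) : Decidable (Spec_select_cordinates x y out) := by unfold Spec_select_cordinates; infer_instance

-- ===== CLAIM (what is proved, stated in full; the proofs are below) =====
def Claim_equal_select_cordinates : Prop := ∀ (x : Int) (y : Int), Dom_select_cordinates x y → Spec_select_cordinates x y (select_cordinates x y)

-- ===== LEMMAS AND PROOFS =====
-- one unfolding step of B's binary-search loop
theorem countLeAux_succ (a : List Int) (v : Int) (fuel lo hi : Nat) :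
    countLeAux a v (fuel + 1) lo hi =
    if lo < hi then
      if PySem.List.pyGetD a (((lo + hi) / 2 : Nat) : Int) 0 ≤ v then countLeAux a v fuel ((lo + hi) / 2 + 1) hi
      else countLeAux a v fuel lo ((lo + hi) / 2)
    else lo := rfl

-- B's binary search over the 8-element table, evaluated to its decision tree
theorem B_side (v : Int) :
    count_le [-200, -150, -100, -50, 0, 50, 100, 150] v =
    (if 0 ≤ v then if 100 ≤ v then if 150 ≤ v then 8 else 7 else if 50 ≤ v then 6 else 5
     else if -100 ≤ v then if -50 ≤ v then 4 else 3 else if -150 ≤ v then 2 else if -200 ≤ v then 1 else 0) := by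
  simp only [count_le, List.length]
  norm_num [countLeAux_succ, PySem.List.pyGetD_ofNat', PySem.List.pyGetD_zero]

-- A's 8-iteration counting loop, evaluated to a sum of indicator terms
set_option maxHeartbeats 1000000 in
theorem A_side (v : Int) :
    ((PySem.List.pyRange 0 8 1).foldl
      (fun acc i => if PySem.List.pyGetD [(-200 : Int), -150, -100, -50, 0, 50, 100, 150, 200] i 0 ≤ v then acc + 1 else acc) (-1 : Int))
    = -1 + (if -200 ≤ v then 1 else 0) + (if -150 ≤ v then 1 else 0) + (if -100 ≤ v then 1 else 0)
        + (if -50 ≤ v then 1 else 0) + (if 0 ≤ v then 1 else 0) + (if 50 ≤ v then 1 else 0)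
        + (if 100 ≤ v then 1 else 0) + (if 150 ≤ v then 1 else 0) := by
  have hr : PySem.List.pyRange 0 8 1 = [0, 1, 2, 3, 4, 5, 6, 7] := by decide
  rw [hr, PySem.List.foldl_ite_add_one]
  have h0 : PySem.List.pyGetD [(-200 : Int), -150, -100, -50, 0, 50, 100, 150, 200] (0 : Int) 0 = (-200 : Int) := by decide
  have h1 : PySem.List.pyGetD [(-200 : Int), -150, -100, -50, 0, 50, 100, 150, 200] (1 : Int) 0 = (-150 : Int) := by decide
  have h2 : PySem.List.pyGetD [(-200 : Int), -150, -100, -50, 0, 50, 100, 150, 200] (2 : Int) 0 = (-100 : Int) := by decide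
  have h3 : PySem.List.pyGetD [(-200 : Int), -150, -100, -50, 0, 50, 100, 150, 200] (3 : Int) 0 = (-50 : Int) := by decide
  have h4 : PySem.List.pyGetD [(-200 : Int), -150, -100, -50, 0, 50, 100, 150, 200] (4 : Int) 0 = (0 : Int) := by decide
  have h5 : PySem.List.pyGetD [(-200 : Int), -150, -100, -50, 0, 50, 100, 150, 200] (5 : Int) 0 = (50 : Int) := by decide
  have h6 : PySem.List.pyGetD [(-200 : Int), -150, -100, -50, 0, 50, 100, 150, 200] (6 : Int) 0 = (100 : Int) := by decide
  have h7 : PySem.List.pyGetD [(-200 : Int), -150, -100, -50, 0, 50, 100, 150, 200] (7 : Int) 0 = (150 : Int) := by decide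
  have hc : ([0, 1, 2, 3, 4, 5, 6, 7] : List Int).countP
      (fun i => decide (PySem.List.pyGetD [(-200 : Int), -150, -100, -50, 0, 50, 100, 150, 200] i 0 ≤ v)) =
      ((if (-200 : Int) ≤ v then 1 else 0) + (if (-150 : Int) ≤ v then 1 else 0) + (if (-100 : Int) ≤ v then 1 else 0)
        + (if (-50 : Int) ≤ v then 1 else 0) + (if (0 : Int) ≤ v then 1 else 0) + (if (50 : Int) ≤ v then 1 else 0)
        + (if (100 : Int) ≤ v then 1 else 0) + (if (150 : Int) ≤ v then 1 else 0) : Nat) := by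
    simp only [List.countP_cons, List.countP_nil, h0, h1, h2, h3, h4, h5, h6, h7, decide_eq_true_eq]
    split_ifs <;> omega
  rw [hc]
  push_cast
  split_ifs <;> omega

-- for any fixed v, A's counting loop and B's binary search agree
theorem count_eq (v : Int) :
    ((PySem.List.pyRange 0 8 1).foldl
      (fun acc i => if PySem.List.pyGetD [(-200 : Int), -150, -100, -50, 0, 50, 100, 150, 200] i 0 ≤ v then acc + 1 else acc) (-1 : Int))
    = (count_le [-200, -150, -100, -50, 0, 50, 100, 150] v : Int) - 1 := by
  rw [A_side, B_side]
  push_cast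
  split_ifs <;> omega

-- ===== VERDICT (by name: the statement is the Claim_ definition above) =====
theorem select_cordinates_spec : Claim_equal_select_cordinates := by
  intro x y _
  unfold Spec_select_cordinates select_cordinates select_cordinates_alt
  simp only [count_eq]
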